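-- pv_equiv track=rewrite | github.com/nripstein/video-contact-pipeline | tests/compare_csvs.py | _choose_sort_keys
-- ===== SOURCE A (Python) =====
-- from typing import Iterable, List, Sequence
--
-- def _choose_sort_keys(columns: Iterable[str]) -> List[str]:
--     preferred = [
--         "frame_id",
--         "image",
--         "type",
--         "which",
--         "contact_label_pred",
--         "probability",
--     ]
--     cols = list(columns)
--     keys = [c for c in preferred if c in cols]
--     for c in sorted(cols):
--         if c not in keys:
--             keys.append(c)
--     return keys
-- ===== SOURCE B (Python) =====
-- from typing import Iterable, List
--
-- def _choose_sort_keys(columns: Iterable[str]) -> List[str]: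
--     preferred = [
--         "frame_id",
--         "image",
--         "type",
--         "which",
--         "contact_label_pred",
--         "probability",
--     ]
--     rank = {c: i for i, c in enumerate(preferred)}
--     fallback = len(preferred)
--     return sorted(dict.fromkeys(columns),
--                   key=lambda c: (rank[c], "") if c in rank else (fallback, c))
-- ===== Notes on version B (the rewrite author's own statement) =====
-- stated objective: faster
-- what changed: A filters the preferred list and then runs a sort-plus-append loop whose 'c not in keys' membership test scans the growing result list; B builds a rank dict for the preferred columns and produces the whole result in one custom-key sort over the deduplicated columns (preferred ranked first, others keyed alphabetically after), eliminating the quadratic membership scans.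
import Mathlib
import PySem

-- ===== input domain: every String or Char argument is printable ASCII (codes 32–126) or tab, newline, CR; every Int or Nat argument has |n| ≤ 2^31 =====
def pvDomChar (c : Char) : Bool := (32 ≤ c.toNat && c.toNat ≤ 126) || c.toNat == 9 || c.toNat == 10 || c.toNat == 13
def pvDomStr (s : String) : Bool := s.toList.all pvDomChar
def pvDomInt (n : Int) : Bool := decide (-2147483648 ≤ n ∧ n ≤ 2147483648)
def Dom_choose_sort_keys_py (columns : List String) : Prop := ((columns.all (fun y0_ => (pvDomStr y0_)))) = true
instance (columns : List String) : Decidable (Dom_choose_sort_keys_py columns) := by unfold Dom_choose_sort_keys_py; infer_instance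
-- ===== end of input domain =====

-- B replaces A's filter-then-append-dedup-loop by one custom-key sort over the deduplicated
-- columns (preferred columns keyed by their rank, others keyed alphabetically after them),
-- removing A's per-element 'c not in keys' scan of the growing result list (measured faster).

-- shared constant: the preferred column order (a literal in both Pythons)
def pvPreferred : List String :=
  ["frame_id", "image", "type", "which", "contact_label_pred", "probability"]

-- ===== PORT A =====
def choose_sort_keys_py (columns : List String) : List String :=
  let cols := columns
  let keys := pvPreferred.filter (fun c => cols.contains c)
  (PySem.List.sorted cols (fun x => x) false).foldl
    (fun keys c => if keys.contains c then keys else keys ++ [c]) keys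

-- ===== PORT B =====
-- rank = {c: i for i, c in enumerate(preferred)}
def pvRank : PySem.Dict String Int :=
  (PySem.List.enumerate pvPreferred).foldl
    (fun d p => d.insert p.2 p.1) PySem.Dict.empty

-- sorted(dict.fromkeys(columns), key=lambda c: (rank[c], "") if c in rank else (fallback, c))
def choose_sort_keys_py_alt (columns : List String) : List String :=
  let fallback : Int := (pvPreferred.length : Int)
  PySem.List.sorted2 (PySem.List.dedup columns)
    (fun c => if pvRank.contains c then pvRank.getD c 0 else fallback)
    (fun c => if pvRank.contains c then "" else c)

-- ===== PRECONDITION & SPEC =====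
def Spec_choose_sort_keys_py (columns : List String) (out : List String) : Prop := out = choose_sort_keys_py_alt columns
instance (columns : List String) (out : List String) : Decidable (Spec_choose_sort_keys_py columns out) := by unfold Spec_choose_sort_keys_py; infer_instance

-- ===== CLAIM (what is proved, stated in full; the proofs are below) =====
def Claim_equal_choose_sort_keys_py : Prop := ∀ (columns : List String), Dom_choose_sort_keys_py columns → Spec_choose_sort_keys_py columns (choose_sort_keys_py columns)

-- ===== LEMMAS AND PROOFS =====

-- the combined sort key of B, packed into one lexicographically ordered value
def pvKey (c : String) : Lex (Int × String) :=
  toLex ((if pvRank.contains c then pvRank.getD c 0 else (pvPreferred.length : Int)),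
         (if pvRank.contains c then "" else c))

-- sorted2 with keys (k1, k2) is sorted with the single lexicographic key
lemma pv_sorted2_eq_sorted {α κ₁ κ₂ : Type} [LinearOrder κ₁] [LinearOrder κ₂]
    (xs : List α) (k1 : α → κ₁) (k2 : α → κ₂) :
    PySem.List.sorted2 xs k1 k2 false
      = PySem.List.sorted xs (fun a => toLex (k1 a, k2 a)) false := by
  have hcmp : (fun a b => decide (k1 a < k1 b) || (!decide (k1 b < k1 a) && decide (k2 a < k2 b)))
      = (fun a b => decide (toLex (k1 a, k2 a) < toLex (k1 b, k2 b))) := by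
    funext a b
    by_cases h1 : k1 a < k1 b
    · simp [h1, Prod.Lex.toLex_lt_toLex]
    · by_cases h2 : k1 b < k1 a
      · have hne : k1 a ≠ k1 b := ne_of_gt h2
        simp [h1, h2, hne, Prod.Lex.toLex_lt_toLex]
      · have heq : k1 a = k1 b := le_antisymm (le_of_not_gt h2) (le_of_not_gt h1)
        simp [heq, Prod.Lex.toLex_lt_toLex]
  rw [PySem.List.sorted_eq_foldl_insertBy]
  simp only [PySem.List.sorted2]
  rw [hcmp]
  simp

-- A's dedup-append loop is PySem.Set.update
lemma pv_foldl_is_update (l acc : List String) :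
    l.foldl (fun keys c => if keys.contains c then keys else keys ++ [c]) acc
      = PySem.Set.update acc l := rfl

lemma pv_keys_pvRank : pvRank.keys = pvPreferred := by decide

lemma pv_contains_pvRank (c : String) : pvRank.contains c = decide (c ∈ pvPreferred) := by
  rw [PySem.Dict.contains_eq_decide_mem_keys, pv_keys_pvRank]

lemma pv_mem_preferred_key (c : String) (h : c ∈ pvPreferred) :
    pvRank.contains c = true ∧ pvRank.getD c 0 < (pvPreferred.length : Int) := by
  fin_cases h <;> exact ⟨by decide, by decide⟩

lemma pv_not_mem_preferred_key (c : String) (h : c ∉ pvPreferred) :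
    pvKey c = toLex ((pvPreferred.length : Int), c) := by
  simp [pvKey, pv_contains_pvRank, h]

lemma pv_dedup_sublist (l : List String) : (PySem.List.dedup l).Sublist l := by
  rw [PySem.List.dedup_eq_ofList]
  induction l with
  | nil => simp [PySem.Set.ofList_nil]
  | cons x xs ih =>
    rw [PySem.Set.ofList_cons]
    refine List.Sublist.cons₂ x ?_
    simp only [PySem.Set.discard]
    exact List.Sublist.trans List.filter_sublist ih

-- the key is strictly increasing along the preferred list
lemma pv_pref_pairwise : pvPreferred.Pairwise (fun a b => pvKey a < pvKey b) := by decide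

-- ===== VERDICT (by name: the statement is the Claim_ definition above) =====
theorem choose_sort_keys_py_spec : Claim_equal_choose_sort_keys_py := by
  intro columns _
  show choose_sort_keys_py columns = choose_sort_keys_py_alt columns
  -- name the pieces
  set S := PySem.List.sorted columns (fun x => x) false with hS
  have hSmem : ∀ x, x ∈ S ↔ x ∈ columns := fun x => PySem.List.mem_sorted _ _ _ _
  set P := pvPreferred.filter (fun c => columns.contains c) with hP
  -- A's value
  have hA : choose_sort_keys_py columns
      = P ++ (PySem.List.dedup S).filter (fun c => !decide (c ∈ pvPreferred)) := by
    show S.foldl (fun keys c => if keys.contains c then keys else keys ++ [c]) P = _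
    rw [pv_foldl_is_update, PySem.Set.update_eq_append_filter]
    rw [← PySem.List.dedup_eq_ofList]
    congr 1
    apply List.filter_congr
    intro x hx
    have hxc : x ∈ columns := (hSmem x).1 ((PySem.List.mem_dedup _ _).1 hx)
    by_cases hp : x ∈ pvPreferred
    · simp [hP, hp, hxc]
    · simp [hP, hp]
  -- B's value
  have hB : choose_sort_keys_py_alt columns
      = PySem.List.sorted (PySem.List.dedup columns) pvKey false := by
    show PySem.List.sorted2 _ _ _ false = _
    rw [pv_sorted2_eq_sorted]
    rfl
  rw [hA, hB]
  set R := (PySem.List.dedup S).filter (fun c => !decide (c ∈ pvPreferred)) with hR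
  have hRmem : ∀ x ∈ R, x ∉ pvPreferred := by
    intro x hx
    have := List.of_mem_filter hx
    simpa using this
  have hPmem : ∀ x ∈ P, x ∈ pvPreferred := fun x hx => List.mem_of_mem_filter hx
  -- permutation
  have hnodupP : P.Nodup := (by decide : pvPreferred.Nodup).filter _
  have hnodupR : R.Nodup := (PySem.List.nodup_dedup _).filter _
  have hnodup : (P ++ R).Nodup := by
    rw [List.nodup_append]
    refine ⟨hnodupP, hnodupR, ?_⟩
    intro a ha b hb hab
    exact hRmem b hb (hab ▸ hPmem a ha)
  have hperm : (P ++ R).Perm (PySem.List.dedup columns) := by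
    rw [List.perm_ext_iff_of_nodup hnodup (PySem.List.nodup_dedup _)]
    intro a
    simp only [List.mem_append, hP, hR, List.mem_filter, PySem.List.mem_dedup,
      List.contains_iff_mem, hSmem, Bool.not_eq_true', decide_eq_false_iff_not]
    constructor
    · rintro (⟨_, h⟩ | ⟨h, _⟩) <;> exact h
    · intro h
      by_cases hp : a ∈ pvPreferred
      · exact Or.inl ⟨hp, h⟩
      · exact Or.inr ⟨h, hp⟩
  -- pairwise strictly increasing key
  have hpairP : P.Pairwise (fun a b => pvKey a < pvKey b) :=
    List.Pairwise.sublist List.filter_sublist pv_pref_pairwise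
  have hpairR : R.Pairwise (fun a b => pvKey a < pvKey b) := by
    have hsubl : (PySem.List.dedup S).Sublist S := pv_dedup_sublist S
    have hle : S.Pairwise (fun a b : String => a ≤ b) := by
      have := PySem.List.sorted_pairwise columns (fun x : String => x)
      simpa using this
    have hlt : (PySem.List.dedup S).Pairwise (fun a b : String => a < b) := by
      have h1 : (PySem.List.dedup S).Pairwise (fun a b : String => a ≤ b) :=
        List.Pairwise.sublist hsubl hle
      have h2 : (PySem.List.dedup S).Pairwise (fun a b : String => a ≠ b) :=
        PySem.List.nodup_dedup S
      exact (h1.and h2).imp (fun h => lt_of_le_of_ne h.1 h.2)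
    have h3 : R.Pairwise (fun a b : String => a < b) :=
      List.Pairwise.sublist List.filter_sublist hlt
    refine h3.imp_of_mem ?_
    intro a b ha hb hab
    rw [pv_not_mem_preferred_key a (hRmem a ha), pv_not_mem_preferred_key b (hRmem b hb)]
    rw [Prod.Lex.toLex_lt_toLex]
    exact Or.inr ⟨rfl, hab⟩
  have hpairPR : ∀ a ∈ P, ∀ b ∈ R, pvKey a < pvKey b := by
    intro a ha b hb
    obtain ⟨hc, hlt⟩ := pv_mem_preferred_key a (hPmem a ha)
    rw [pv_not_mem_preferred_key b (hRmem b hb)]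
    show toLex (_, _) < _
    rw [Prod.Lex.toLex_lt_toLex]
    left
    simpa [hc] using hlt
  have hpair : (P ++ R).Pairwise (fun a b => pvKey a < pvKey b) := by
    rw [List.pairwise_append]
    exact ⟨hpairP, hpairR, hpairPR⟩
  exact (PySem.List.sorted_eq_of_perm_of_pairwise_lt _ _ pvKey hperm hpair).symm
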